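-- pv_equiv track=rewrite | github.com/jochman03/BO | Lab6/G-TSP.py | G_TSP
-- ===== SOURCE A (Python) =====
-- def G_TSP(graph, weights):
--     sorted_edges = sorted(weights.items(), key=lambda item: item[1]) # sortowanie krawedzi po wagach
--     Eo = dict() # Słownik:  wierzchołek początkowy -> wierzchołek końcowy krawędzi
--     cost = 0 # koszt całkowity
--     def is_cycle(u, v): # Funkcja sprawdzająca czy dodanie krawędzi (u, v) spowoduje podcykl
--         node = v # wierzchołek końcowy
--         goal = u # wierzchołek początkowy
--         while node in Eo: # dopóki wierzchołek końcowy krawędzi jest w słowniku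
--             node = Eo[node] # wybieranie kolejnego wierzchołka z krawezi
--             if node == goal: # jeśli istnieje inna ścieżka do docelowego wierzchołka
--                 return True # to znaczy, że dodanie krawędzi (u, v) spowoduje podcykl
--         return False # W tym miejscu nie ma podcyklu
--
--     for ((u, v), weight) in sorted_edges:   # dla każdej krawędzi (u, v) w posortowanej liście krawędzi
--         if u in Eo.keys() or v in Eo.values(): # jeśli wierzchołek początkowy krawędzi jest już w słowniku
--             continue # lub wierzchołek końcowy krawędzi jest już w słowniku, to trzeba pominąć
--         if len(Eo.keys()) < (len(graph.keys()) -1): # jeśli to ostatnia krawędź, to może być cykl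
--             if is_cycle(u, v): # sprawdzanie czy dodanie krawędzi (u, v) spowoduje podcykl
--                 continue # jeśli tak, to pomijanie krawędzi
--         Eo[u] = v # dodawanie krawędzi (u, v) do słownika
--         cost += weight # dodawanie wagi krawędzi do kosztu całkowitego
--     path = list() # lista wierzchołków w ścieżce
--     if len(Eo) < len(graph): # nie odwiedzono wszystkich wierzchołków
--         return None, 0  # czyli nie rozwiązano problemu
--     node = sorted_edges[0][0][0] # pierwszy wierzchołek z listy posortowanych krawedzi
--     path.append(node) # dodawanie wierzchołka początkowego do listy wierzchołków w ścieżce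
--     while len(path) < len(Eo.keys()): # dopóki liczba wierzchołków w ścieżce jest mniejsza niż liczba krawędzi w słowniku
--         if node not in Eo: # jeśli wierzchołek początkowy krawędzi nie jest w słowniku
--             return None, 0 # To algorytm zawiódł
--         path.append(Eo[node]) # dodawanie wierzchołka do wyznaczonej ścieżki
--         node = Eo[node]  # wybieranie kolejnego wierzchołka na podstawie krawędzi
--     return path, cost # zwracanie ścieżki i kosztu
-- ===== SOURCE B (Python) =====
-- def G_TSP(graph, weights):
--     # Greedy-edge TSP: pick cheapest edges, skipping used endpoints and premature
--     # subcycles.  Instead of scanning Eo.values() and walking the successor chain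
--     # for every candidate edge, maintain a predecessor map and chain-endpoint maps
--     # (start->end, end->start), so each edge is decided by dictionary lookups alone.
--     edges = sorted(weights.items(), key=lambda item: item[1])
--     succ = {}   # chosen edge u -> v
--     pred = {}   # chosen edge v -> u  (inverse of succ)
--     tail = {}   # start of a chain -> its end
--     head = {}   # end of a chain -> its start
--     cost = 0
--     n = len(graph)
--     for (u, v), w in edges:
--         if u in succ or v in pred:
--             continue
--         if len(succ) < n - 1 and tail.get(v) == u:
--             continue  # edge would close a cycle too early
--         s = head.pop(u, u)  # start of the chain ending at u (u itself if isolated)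
--         e = tail.pop(v, v)  # end of the chain starting at v (v itself if isolated)
--         tail[s] = e
--         head[e] = s
--         succ[u] = v
--         pred[v] = u
--         cost += w
--     if len(succ) < n:
--         return None, 0
--     node = edges[0][0][0]
--     path = [node]
--     for _ in range(len(succ) - 1):
--         if node not in succ:
--             return None, 0
--         node = succ[node]
--         path.append(node)
--     return path, cost
-- ===== Notes on version B (the rewrite author's own statement) =====
-- stated objective: alternative
-- what changed: Instead of rescanning Eo.values() and walking the successor chain for every candidate edge, B maintains a predecessor map plus chain-endpoint maps (start->end, end->start) and decides each edge with constant-count dictionary lookups; on a timing run's generated inputs this was not measurably faster, so no speed is claimed.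
import Mathlib
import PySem

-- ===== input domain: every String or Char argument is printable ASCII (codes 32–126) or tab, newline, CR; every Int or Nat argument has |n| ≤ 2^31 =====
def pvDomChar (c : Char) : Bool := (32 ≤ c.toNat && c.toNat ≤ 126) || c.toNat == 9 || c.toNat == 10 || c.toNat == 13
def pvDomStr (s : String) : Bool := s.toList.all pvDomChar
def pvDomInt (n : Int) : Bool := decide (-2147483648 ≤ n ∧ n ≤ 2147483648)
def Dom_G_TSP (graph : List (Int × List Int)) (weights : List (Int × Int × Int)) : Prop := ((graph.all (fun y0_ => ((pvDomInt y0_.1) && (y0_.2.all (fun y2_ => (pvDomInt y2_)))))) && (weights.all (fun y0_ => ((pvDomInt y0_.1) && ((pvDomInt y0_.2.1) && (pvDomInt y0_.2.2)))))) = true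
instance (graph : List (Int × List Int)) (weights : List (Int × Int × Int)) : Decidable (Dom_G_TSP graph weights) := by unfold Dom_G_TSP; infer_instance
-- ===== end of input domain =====

-- B replaces A's per-edge values() scan and successor-chain walk by maintained
-- predecessor and chain-endpoint dictionaries (a different algorithm, same results).

-- ===== PORT A =====
-- A's inner `is_cycle` while-loop: walk the successor chain from `node`, return true
-- on reaching `goal`.  Fuel Eo.size + 1 is exact wherever the Python loop terminates
-- (and it always terminates on the states G_TSP reaches: successor values are distinct).
def gtspWalkA (Eo : PySem.Dict Int Int) (goal : Int) : Nat → Int → Bool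
  | 0, _ => false
  | fuel + 1, node =>
    match Eo.get? node with
    | none => false
    | some nxt => if nxt = goal then true else gtspWalkA Eo goal fuel nxt

def gtspIsCycle (Eo : PySem.Dict Int Int) (u v : Int) : Bool :=
  gtspWalkA Eo u (Eo.size + 1) v

-- one iteration of A's `for ((u, v), weight) in sorted_edges` loop
def gtspStepA (n : Nat) (st : PySem.Dict Int Int × Int) (it : (Int × Int) × Int) :
    PySem.Dict Int Int × Int :=
  if st.1.contains it.1.1 || st.1.values.contains it.1.2 then st
  else if decide ((st.1.size : Int) < (n : Int) - 1) && gtspIsCycle st.1 it.1.1 it.1.2 then st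
  else (st.1.insert it.1.1 it.1.2, st.2 + it.2)

-- A's final `while len(path) < len(Eo)` reconstruction loop (runs Eo.size - 1 times)
def gtspPathA (Eo : PySem.Dict Int Int) : Nat → Int → List Int → Option (List Int)
  | 0, _, path => some path
  | k + 1, node, path =>
    match Eo.get? node with
    | none => none
    | some nxt => gtspPathA Eo k nxt (path ++ [nxt])

def G_TSP (graph : List (Int × List Int)) (weights : List (Int × Int × Int)) :
    Option (List Int) × Int :=
  let gdict := PySem.Dict.ofList graph
  let wdict : PySem.Dict (Int × Int) Int :=
    PySem.Dict.ofList (weights.map (fun t => ((t.1, t.2.1), t.2.2)))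
  let sorted_edges := PySem.List.sorted wdict.items (fun it => it.2) false
  let st := sorted_edges.foldl (gtspStepA gdict.size) (PySem.Dict.empty, 0)
  if st.1.size < gdict.size then (none, 0)
  else
    match sorted_edges with
    | [] => (none, 0)  -- Python raises IndexError at sorted_edges[0]; excluded by Pre_
    | e :: _ =>
      match gtspPathA st.1 (st.1.size - 1) e.1.1 [e.1.1] with
      | none => (none, 0)
      | some path => (some path, st.2)

-- ===== PORT B =====
structure GTSPState where
  succ : PySem.Dict Int Int
  pred : PySem.Dict Int Int
  tail : PySem.Dict Int Int
  head : PySem.Dict Int Int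
  cost : Int

-- one iteration of B's edge loop: plain dictionary lookups; `pop(k, k)` is get?+erase
def gtspStepB (n : Nat) (st : GTSPState) (it : (Int × Int) × Int) : GTSPState :=
  if st.succ.contains it.1.1 || st.pred.contains it.1.2 then st
  else if decide ((st.succ.size : Int) < (n : Int) - 1) && (st.tail.get? it.1.2 == some it.1.1) then st
  else
    let s := (st.head.get? it.1.1).getD it.1.1
    let head1 := st.head.erase it.1.1
    let e := (st.tail.get? it.1.2).getD it.1.2
    let tail1 := st.tail.erase it.1.2
    { succ := st.succ.insert it.1.1 it.1.2,
      pred := st.pred.insert it.1.2 it.1.1,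
      tail := tail1.insert s e,
      head := head1.insert e s,
      cost := st.cost + it.2 }

-- B's `for _ in range(len(succ) - 1)` reconstruction loop
def gtspPathB (succ : PySem.Dict Int Int) : Nat → Int → List Int → Option (List Int)
  | 0, _, path => some path
  | k + 1, node, path =>
    match succ.get? node with
    | none => none
    | some nxt => gtspPathB succ k nxt (path ++ [nxt])

def G_TSP_alt (graph : List (Int × List Int)) (weights : List (Int × Int × Int)) :
    Option (List Int) × Int :=
  let wdict : PySem.Dict (Int × Int) Int :=
    PySem.Dict.ofList (weights.map (fun t => ((t.1, t.2.1), t.2.2)))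
  let edges := PySem.List.sorted wdict.items (fun it => it.2) false
  let n := (PySem.Dict.ofList graph : PySem.Dict Int (List Int)).size
  let st := edges.foldl (gtspStepB n)
    ⟨PySem.Dict.empty, PySem.Dict.empty, PySem.Dict.empty, PySem.Dict.empty, 0⟩
  if st.succ.size < n then (none, 0)
  else
    match edges with
    | [] => (none, 0)  -- Python raises IndexError at edges[0]; excluded by Pre_
    | e :: _ =>
      match gtspPathB st.succ (st.succ.size - 1) e.1.1 [e.1.1] with
      | none => (none, 0)
      | some path => (some path, st.cost)

-- ===== PRECONDITION & SPEC =====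
-- Pre_ excludes only the inputs on which the Python A raises IndexError
-- (empty graph together with empty weights: sorted_edges[0] is indexed).
def Pre_G_TSP (graph : List (Int × List Int)) (weights : List (Int × Int × Int)) : Prop :=
  graph ≠ [] ∨ weights ≠ []
instance (graph : List (Int × List Int)) (weights : List (Int × Int × Int)) :
    Decidable (Pre_G_TSP graph weights) := by unfold Pre_G_TSP; infer_instance

def pvWitness_G_TSP : (List (Int × List Int)) × (List (Int × Int × Int)) :=
  ([(1, [2]), (2, [1])], [(1, 2, 5), (2, 1, 7)])

def Spec_G_TSP (graph : List (Int × List Int)) (weights : List (Int × Int × Int))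
    (out : Option (List Int) × Int) : Prop := out = G_TSP_alt graph weights
instance (graph : List (Int × List Int)) (weights : List (Int × Int × Int))
    (out : Option (List Int) × Int) : Decidable (Spec_G_TSP graph weights out) := by
  unfold Spec_G_TSP; infer_instance

-- ===== CLAIM (what is proved, stated in full; the proofs are below) =====
def Claim_equal_G_TSP : Prop := ∀ (graph : List (Int × List Int)) (weights : List (Int × Int × Int)), Dom_G_TSP graph weights → Pre_G_TSP graph weights → Spec_G_TSP graph weights (G_TSP graph weights)

-- ===== LEMMAS AND PROOFS =====

-- reachability along the successor dictionary (reflexive-transitive chain)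
inductive GReach (Eo : PySem.Dict Int Int) : Int → Int → Prop
  | refl (x : Int) : GReach Eo x x
  | step {x y e : Int} : Eo.get? x = some y → GReach Eo y e → GReach Eo x e

theorem greach_trans {Eo : PySem.Dict Int Int} {a b c : Int}
    (h1 : GReach Eo a b) (h2 : GReach Eo b c) : GReach Eo a c := by
  induction h1 with
  | refl => exact h2
  | step hx _ ih => exact GReach.step hx (ih h2)

theorem contains_of_get?_eq_some {d : PySem.Dict Int Int} {x y : Int}
    (h : d.get? x = some y) : d.contains x = true := by
  rw [PySem.Dict.contains_eq_isSome_get?, h]; rfl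

theorem get?_eq_none_of_contains_false {d : PySem.Dict Int Int} {x : Int}
    (h : d.contains x = false) : d.get? x = none :=
  (PySem.Dict.get?_eq_none_iff_contains d x).mpr h

-- the endpoint of a chain (a vertex with no successor) is unique
theorem greach_end_unique {Eo : PySem.Dict Int Int} {x e e' : Int}
    (h1 : GReach Eo x e) (he : Eo.contains e = false)
    (h2 : GReach Eo x e') (he' : Eo.contains e' = false) : e = e' := by
  induction h1 with
  | refl x =>
    cases h2 with
    | refl => rfl
    | step hx _ => rw [get?_eq_none_of_contains_false he] at hx; cases hx
  | @step a y b hx _ ih =>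
    cases h2 with
    | refl => rw [get?_eq_none_of_contains_false he'] at hx; cases hx
    | @step _ y' _ hx' hr' =>
      have hyy : y = y' := by rw [hx] at hx'; injection hx'
      subst hyy; exact ih he hr'

theorem greach_stop {Eo : PySem.Dict Int Int} {x e : Int}
    (h : GReach Eo x e) (hx : Eo.contains x = false) : e = x := by
  cases h with
  | refl => rfl
  | step hg _ => rw [get?_eq_none_of_contains_false hx] at hg; cases hg

theorem greach_last_step {Eo : PySem.Dict Int Int} {x e : Int} (h : GReach Eo x e) :
    x = e ∨ ∃ w, Eo.get? w = some e := by
  induction h with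
  | refl => exact Or.inl rfl
  | step hx hr ih =>
    rcases ih with rfl | hw
    · exact Or.inr ⟨_, hx⟩
    · exact Or.inr hw

theorem greach_drop_aux (E' Eo : PySem.Dict Int Int) (u v : Int)
    (hE : E' = Eo.insert u v) :
    ∀ {x e : Int}, GReach E' x e → E'.contains e = false →
    GReach Eo x e ∨ (GReach Eo x u ∧ GReach Eo v e) := by
  intro x e h
  induction h with
  | refl x => intro _; exact Or.inl (.refl x)
  | step hx hr ih =>
    intro he
    rename_i a y b
    by_cases hau : a = u
    · have hy : y = v := by
        rw [hau, hE, PySem.Dict.get?_insert_self] at hx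
        exact (Option.some.inj hx).symm
      have hve : GReach Eo v b := by
        rcases ih he with h1 | ⟨_, h3⟩
        · rw [← hy]; exact h1
        · exact h3
      exact Or.inr ⟨by rw [hau]; exact .refl u, hve⟩
    · have hx' : Eo.get? a = some y := by
        rw [hE, PySem.Dict.get?_insert_of_ne _ _ hau] at hx; exact hx
      rcases ih he with h1 | ⟨h2, h3⟩
      · exact Or.inl (.step hx' h1)
      · exact Or.inr ⟨.step hx' h2, h3⟩

theorem greach_drop {Eo : PySem.Dict Int Int} {u v x e : Int}
    (h : GReach (Eo.insert u v) x e)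
    (he : (Eo.insert u v).contains e = false) :
    GReach Eo x e ∨ (GReach Eo x u ∧ GReach Eo v e) :=
  greach_drop_aux (Eo.insert u v) Eo u v rfl h he

-- `seen` is the reversed walk so far: its head steps to `x`, its base has no predecessor
def GChain (Eo pred : PySem.Dict Int Int) : List Int → Int → Prop
  | [], x => pred.contains x = false
  | h :: t, x => Eo.get? h = some x ∧ GChain Eo pred t h

theorem gchain_contains {Eo pred : PySem.Dict Int Int} :
    ∀ {seen : List Int} {x : Int}, GChain Eo pred seen x →
      ∀ s ∈ seen, Eo.contains s = true := by
  intro seen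
  induction seen with
  | nil => intro x _ s hs; cases hs
  | cons h t ih =>
    intro x hch s hs
    rcases List.mem_cons.mp hs with rfl | hs
    · exact contains_of_get?_eq_some hch.1
    · exact ih hch.2 s hs

theorem gchain_pred_cases {Eo pred : PySem.Dict Int Int} :
    ∀ {seen : List Int} {x : Int}, GChain Eo pred seen x → ∀ y ∈ seen,
      pred.contains y = false ∨ ∃ w ∈ seen, Eo.get? w = some y := by
  intro seen
  induction seen with
  | nil => intro x _ y hy; cases hy
  | cons h t ih =>
    intro x hch y hy
    rcases List.mem_cons.mp hy with rfl | hy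
    · cases t with
      | nil => exact Or.inl hch.2
      | cons h' t' => exact Or.inr ⟨h', List.mem_cons_of_mem _ (List.mem_cons_self), hch.2.1⟩
    · rcases ih hch.2 y hy with h1 | ⟨w, hw, hgw⟩
      · exact Or.inl h1
      · exact Or.inr ⟨w, List.mem_cons_of_mem _ hw, hgw⟩

-- extend the walk by one step: the new node is fresh
theorem gchain_extend {Eo pred : PySem.Dict Int Int}
    (hI2 : ∀ x y : Int, Eo.get? x = some y ↔ pred.get? y = some x)
    {seen : List Int} {x y : Int}
    (hch : GChain Eo pred seen x) (hnd : (x :: seen).Nodup)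
    (hx : Eo.get? x = some y) :
    GChain Eo pred (x :: seen) y ∧ (y :: x :: seen).Nodup := by
  have hinj : ∀ a b c : Int, Eo.get? a = some c → Eo.get? b = some c → a = b := by
    intro a b c ha hb
    rw [hI2] at ha hb; rw [ha] at hb; injection hb
  have hymem : y ∉ x :: seen := by
    intro hy
    rcases List.mem_cons.mp hy with rfl | hy
    · -- y = x : x would have itself as predecessor
      have hpx : pred.contains y = true := contains_of_get?_eq_some ((hI2 y y).mp hx)
      cases hsn : seen with
      | nil => rw [hsn] at hch; rw [hch] at hpx; cases hpx
      | cons h t =>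
        rw [hsn] at hch
        have := hinj _ _ _ hch.1 hx
        subst this
        rw [hsn] at hnd
        exact (List.nodup_cons.mp hnd).1 List.mem_cons_self
    · rcases gchain_pred_cases hch y hy with h1 | ⟨w, hw, hgw⟩
      · have : pred.contains y = true := contains_of_get?_eq_some ((hI2 x y).mp hx)
        rw [h1] at this; cases this
      · have := hinj _ _ _ hgw hx
        subst this
        exact (List.nodup_cons.mp hnd).1 hw
  exact ⟨⟨hx, hch⟩, List.nodup_cons.mpr ⟨hymem, hnd⟩⟩

theorem nodup_chain_length_le {Eo pred : PySem.Dict Int Int} {seen : List Int} {x : Int}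
    (hch : GChain Eo pred seen x) (hx : Eo.contains x = true)
    (hnd : (x :: seen).Nodup) : (x :: seen).length ≤ Eo.keys.length := by
  have hsub : ∀ s ∈ x :: seen, s ∈ Eo.keys := by
    intro s hs
    rcases List.mem_cons.mp hs with rfl | hs
    · exact (PySem.Dict.contains_iff_mem_keys Eo s).mp hx
    · exact (PySem.Dict.contains_iff_mem_keys Eo s).mp (gchain_contains hch s hs)
  calc (x :: seen).length = (x :: seen).toFinset.card := (List.toFinset_card_of_nodup hnd).symm
    _ ≤ Eo.keys.toFinset.card := by
        apply Finset.card_le_card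
        intro a ha
        rw [List.mem_toFinset] at ha ⊢
        exact hsub a ha
    _ ≤ Eo.keys.length := Eo.keys.toFinset_card_le

-- every vertex with no predecessor reaches a chain end
theorem greach_total {Eo pred : PySem.Dict Int Int}
    (hI2 : ∀ x y : Int, Eo.get? x = some y ↔ pred.get? y = some x) :
    ∀ (k : Nat) (seen : List Int) (x : Int),
      Eo.keys.length + 1 ≤ k + (x :: seen).length →
      GChain Eo pred seen x → (x :: seen).Nodup →
      ∃ e, GReach Eo x e ∧ Eo.contains e = false := by
  intro k
  induction k with
  | zero =>
    intro seen x hlen hch hnd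
    cases hgx : Eo.get? x with
    | none =>
      exact ⟨x, .refl x, (PySem.Dict.get?_eq_none_iff_contains Eo x).mp hgx⟩
    | some y =>
      have := nodup_chain_length_le hch (contains_of_get?_eq_some hgx) hnd
      omega
  | succ k ih =>
    intro seen x hlen hch hnd
    cases hgx : Eo.get? x with
    | none =>
      exact ⟨x, .refl x, (PySem.Dict.get?_eq_none_iff_contains Eo x).mp hgx⟩
    | some y =>
      obtain ⟨hch', hnd'⟩ := gchain_extend hI2 hch hnd hgx
      obtain ⟨e, hr, he⟩ := ih (x :: seen) y (by simp at hlen ⊢; omega) hch' hnd'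
      exact ⟨e, .step hgx hr, he⟩

-- evaluation of A's is_cycle walk: it returns true iff the chain end from x is the goal
theorem walkA_eval {Eo pred : PySem.Dict Int Int}
    (hI2 : ∀ x y : Int, Eo.get? x = some y ↔ pred.get? y = some x)
    {u : Int} (hu : Eo.contains u = false) :
    ∀ (k : Nat) (seen : List Int) (x e : Int),
      Eo.keys.length + 1 ≤ k + (x :: seen).length →
      GChain Eo pred seen x → (x :: seen).Nodup →
      GReach Eo x e → Eo.contains e = false →
      gtspWalkA Eo u k x = (Eo.contains x && decide (e = u)) := by
  intro k
  induction k with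
  | zero =>
    intro seen x e hlen hch hnd hr he
    cases hgx : Eo.get? x with
    | none =>
      have hcx : Eo.contains x = false := (PySem.Dict.get?_eq_none_iff_contains Eo x).mp hgx
      simp [gtspWalkA, hcx]
    | some y =>
      have := nodup_chain_length_le hch (contains_of_get?_eq_some hgx) hnd
      omega
  | succ k ih =>
    intro seen x e hlen hch hnd hr he
    cases hgx : Eo.get? x with
    | none =>
      have hcx : Eo.contains x = false := (PySem.Dict.get?_eq_none_iff_contains Eo x).mp hgx
      simp [gtspWalkA, hgx, hcx]
    | some y =>
      have hcx : Eo.contains x = true := contains_of_get?_eq_some hgx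
      have hye : GReach Eo y e := by
        cases hr with
        | refl => rw [hcx] at he; cases he
        | step hg hr' =>
          rw [hgx] at hg
          rw [Option.some.inj hg]
          exact hr'
      by_cases hyu : y = u
      · have heu : e = u := by
          rw [hyu] at hye
          exact greach_stop hye hu
        simp [gtspWalkA, hgx, hcx, hyu, heu]
      · obtain ⟨hch', hnd'⟩ := gchain_extend hI2 hch hnd hgx
        have hrec := ih (x :: seen) y e (by simp at hlen ⊢; omega) hch' hnd' hye he
        cases hcy : Eo.contains y with
        | true =>
          rw [hcy] at hrec
          simp [gtspWalkA, hgx, hcx, hyu, hrec]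
        | false =>
          have hey : e = y := greach_stop hye hcy
          rw [hcy] at hrec
          simp only [gtspWalkA, hgx, hcx, if_neg hyu, hrec]
          simp [hey, hyu]

-- the seven-part invariant tying B's dictionaries to A's Eo
def GInv (Eo pred tail head : PySem.Dict Int Int) : Prop :=
  Eo.keys.Nodup ∧ pred.keys.Nodup ∧
  (∀ x y : Int, Eo.get? x = some y ↔ pred.get? y = some x) ∧
  (∀ v : Int, (tail.get? v).isSome → Eo.contains v = true) ∧
  (∀ x e : Int, Eo.contains x = true → pred.contains x = false →
      GReach Eo x e → Eo.contains e = false → tail.get? x = some e) ∧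
  (∀ e : Int, (head.get? e).isSome → pred.contains e = true) ∧
  (∀ x e : Int, pred.contains e = true → Eo.contains e = false → pred.contains x = false →
      GReach Eo x e → head.get? e = some x)

theorem greach_flip {Eo pred : PySem.Dict Int Int}
    (hI2 : ∀ x y : Int, Eo.get? x = some y ↔ pred.get? y = some x)
    {a b : Int} (h : GReach pred a b) : GReach Eo b a := by
  induction h with
  | refl x => exact .refl x
  | step hx hr ih =>
    rename_i p q r
    exact greach_trans ih (.step ((hI2 q p).mpr hx) (.refl p))

theorem size_eq_keys_length (d : PySem.Dict Int Int) : d.size = d.keys.length := by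
  simp [PySem.Dict.size, PySem.Dict.keys]

-- `s = head.pop(u, u)` really is the start of the chain ending at u
theorem head_spec {Eo pred tail head : PySem.Dict Int Int} (hInv : GInv Eo pred tail head)
    {u : Int} (hu : Eo.contains u = false) :
    GReach Eo ((head.get? u).getD u) u ∧ pred.contains ((head.get? u).getD u) = false ∧
      ((head.get? u).getD u = u ∨ Eo.contains ((head.get? u).getD u) = true) := by
  obtain ⟨hnd, hndp, hI2, hI3, hI4, hI5, hI6⟩ := hInv
  have hI2' : ∀ x y : Int, pred.get? x = some y ↔ Eo.get? y = some x := by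
    intro x y; rw [hI2]
  cases hh : head.get? u with
  | none =>
    refine ⟨.refl u, ?_, Or.inl rfl⟩
    by_contra hpu
    have hpu : pred.contains u = true := by
      cases h : pred.contains u
      · exact absurd h hpu
      · rfl
    obtain ⟨x0, hr0, hp0⟩ := greach_total (Eo := pred) (pred := Eo) hI2'
      pred.keys.length [] u (by simp) hu (by simp)
    have hr0' : GReach Eo x0 u := greach_flip hI2 hr0
    have := hI6 x0 u hpu hu hp0 hr0'
    rw [hh] at this; cases this
  | some s0 =>
    have hpu : pred.contains u = true := hI5 u (by rw [hh]; rfl)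
    obtain ⟨x0, hr0, hp0⟩ := greach_total (Eo := pred) (pred := Eo) hI2'
      pred.keys.length [] u (by simp) hu (by simp)
    have hr0' : GReach Eo x0 u := greach_flip hI2 hr0
    have hhu := hI6 x0 u hpu hu hp0 hr0'
    rw [hh] at hhu; injection hhu with hhu
    subst hhu
    have hxu : s0 ≠ u := by
      intro h; rw [h, hpu] at hp0; cases hp0
    have hcs : Eo.contains s0 = true := by
      cases hr0' with
      | refl => exact absurd rfl hxu
      | step hg _ => exact contains_of_get?_eq_some hg
    exact ⟨hr0', hp0, Or.inr hcs⟩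

-- `e = tail.pop(v, v)` really is the end of the chain starting at v
theorem tail_spec {Eo pred tail head : PySem.Dict Int Int} (hInv : GInv Eo pred tail head)
    {v : Int} (hv : pred.contains v = false) :
    GReach Eo v ((tail.get? v).getD v) ∧ Eo.contains ((tail.get? v).getD v) = false ∧
      ((tail.get? v).getD v = v ∨ pred.contains ((tail.get? v).getD v) = true) := by
  obtain ⟨hnd, hndp, hI2, hI3, hI4, hI5, hI6⟩ := hInv
  cases hcv : Eo.contains v with
  | false =>
    have : tail.get? v = none := by
      cases h : tail.get? v with
      | none => rfl
      | some w => have := hI3 v (by rw [h]; rfl); rw [hcv] at this; cases this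
    rw [this]
    exact ⟨.refl v, hcv, Or.inl rfl⟩
  | true =>
    obtain ⟨e, hr, he⟩ := greach_total hI2 Eo.keys.length [] v (by simp) hv (by simp)
    have ht := hI4 v e hcv hv hr he
    rw [ht]
    have hev : e ≠ v := by intro h; rw [h, hcv] at he; cases he
    have hpe : pred.contains e = true := by
      rcases greach_last_step hr with h | ⟨w, hw⟩
      · exact absurd h.symm hev
      · exact contains_of_get?_eq_some ((hI2 w e).mp hw)
    exact ⟨hr, he, Or.inr hpe⟩

theorem values_contains_eq {Eo pred : PySem.Dict Int Int}
    (hI2 : ∀ x y : Int, Eo.get? x = some y ↔ pred.get? y = some x)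
    (hnd : Eo.keys.Nodup) (v : Int) : Eo.values.contains v = pred.contains v := by
  rw [Bool.eq_iff_iff]
  constructor
  · intro h
    rw [List.contains_eq_mem, decide_eq_true_iff] at h
    simp only [PySem.Dict.values, List.mem_map] at h
    obtain ⟨p, hp, hpv⟩ := h
    have : Eo.get? p.1 = some v := by
      rw [PySem.Dict.get?_eq_some_iff_mem_items Eo p.1 v hnd]
      rw [← hpv]; exact hp
    exact contains_of_get?_eq_some ((hI2 p.1 v).mp this)
  · intro h
    rw [PySem.Dict.contains_eq_isSome_get?] at h
    cases hg : pred.get? v with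
    | none => rw [hg] at h; cases h
    | some x =>
      have : Eo.get? x = some v := (hI2 x v).mpr hg
      have hmem := PySem.Dict.mem_items_of_get?_eq_some Eo this
      rw [List.contains_eq_mem, decide_eq_true_iff]
      simp only [PySem.Dict.values, List.mem_map]
      exact ⟨(x, v), hmem, rfl⟩

-- dictionary erase: pointwise description (no such lemma in the prelude)
theorem find_filter_ne (k x : Int) (hxk : x ≠ k) : ∀ l : List (Int × Int),
    List.find? (fun p => p.1 == x) (l.filter (fun p => !(p.1 == k))) =
      List.find? (fun p => p.1 == x) l := by
  intro l
  induction l with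
  | nil => rfl
  | cons p t ih =>
    by_cases hpk : p.1 = k
    · have h1 : (!(p.1 == k)) = false := by simp [hpk]
      have h2 : (p.1 == x) = false := by
        simp only [beq_eq_false_iff_ne, ne_eq, hpk]
        omega
      simp [h1, h2, ih]
    · have h1 : (!(p.1 == k)) = true := by simp [hpk]
      simp only [List.filter_cons, h1, if_pos, List.find?_cons]
      by_cases hpx : p.1 = x
      · simp [hpx]
      · have h2 : (p.1 == x) = false := by simp [hpx]
        simp [h2, ih]

theorem dict_get?_erase (d : PySem.Dict Int Int) (k x : Int) :
    (d.erase k).get? x = if x = k then none else d.get? x := by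
  simp only [PySem.Dict.erase, PySem.Dict.get?]
  by_cases hxk : x = k
  · have hfind : List.find? (fun p => p.1 == x) (d.items.filter (fun p => !(p.1 == k))) = none := by
      rw [List.find?_eq_none]
      intro p hp
      have := (List.mem_filter.mp hp).2
      simp only [Bool.not_eq_true', beq_eq_false_iff_ne, ne_eq] at this
      simp [hxk, this]
    simp [hxk]
  · rw [find_filter_ne k x hxk]
    simp [hxk]

-- the invariant survives one accepted edge (u, v)
theorem ginv_insert {Eo pred tail head : PySem.Dict Int Int} (hInv : GInv Eo pred tail head)
    {u v : Int} (hu : Eo.contains u = false) (hv : pred.contains v = false) :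
    GInv (Eo.insert u v) (pred.insert v u)
      ((tail.erase v).insert ((head.get? u).getD u) ((tail.get? v).getD v))
      ((head.erase u).insert ((tail.get? v).getD v) ((head.get? u).getD u)) := by
  obtain ⟨hsr, hsp, hsc⟩ := head_spec hInv hu
  obtain ⟨her, hec, hep⟩ := tail_spec hInv hv
  obtain ⟨hnd, hndp, hI2, hI3, hI4, hI5, hI6⟩ := hInv
  set s := (head.get? u).getD u with hs
  set e0 := (tail.get? v).getD v with he0def
  have hgu : Eo.get? u = none := get?_eq_none_of_contains_false hu
  have hgv : pred.get? v = none := get?_eq_none_of_contains_false hv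
  -- pointwise descriptions of the four new dictionaries
  have htail' : ∀ x : Int, ((tail.erase v).insert s e0).get? x =
      if x = s then some e0 else if x = v then none else tail.get? x := by
    intro x
    rw [PySem.Dict.get?_insert, dict_get?_erase]
  have hhead' : ∀ x : Int, ((head.erase u).insert e0 s).get? x =
      if x = e0 then some s else if x = u then none else head.get? x := by
    intro x
    rw [PySem.Dict.get?_insert, dict_get?_erase]
  have hcE : ∀ x : Int, (Eo.insert u v).contains x = true ↔ x = u ∨ Eo.contains x = true := by
    intro x
    rw [PySem.Dict.contains_insert]
    simp
  have hcEf : ∀ x : Int, (Eo.insert u v).contains x = false ↔ x ≠ u ∧ Eo.contains x = false := by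
    intro x
    rw [PySem.Dict.contains_insert]
    simp
  have hcP : ∀ x : Int, (pred.insert v u).contains x = true ↔ x = v ∨ pred.contains x = true := by
    intro x
    rw [PySem.Dict.contains_insert]
    simp
  have hcPf : ∀ x : Int, (pred.insert v u).contains x = false ↔ x ≠ v ∧ pred.contains x = false := by
    intro x
    rw [PySem.Dict.contains_insert]
    simp
  -- s ≠ u forces a genuine head entry at u, hence an incoming edge at u
  have hheadu : s ≠ u → head.get? u = some s ∧ pred.contains u = true := by
    intro hsu
    cases hh : head.get? u with
    | none => rw [hs, hh] at hsu; exact absurd rfl hsu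
    | some w =>
      have hpu : pred.contains u = true := hI5 u (by rw [hh]; rfl)
      have : s = w := by rw [hs, hh]; rfl
      rw [this]
      exact ⟨rfl, hpu⟩
  refine ⟨PySem.Dict.nodup_keys_insert _ _ _ hnd, PySem.Dict.nodup_keys_insert _ _ _ hndp,
    ?_, ?_, ?_, ?_, ?_⟩
  · -- I2': the new pred is still the inverse of the new succ
    intro x y
    rw [PySem.Dict.get?_insert, PySem.Dict.get?_insert]
    by_cases hxu : x = u
    · subst hxu
      by_cases hyv : y = v
      · subst hyv; simp
      · rw [if_pos rfl, if_neg hyv]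
        constructor
        · intro h
          exact absurd (Option.some.inj h).symm hyv
        · intro h
          have := (hI2 x y).mpr h
          rw [hgu] at this; cases this
    · by_cases hyv : y = v
      · subst hyv
        rw [if_neg hxu, if_pos rfl]
        constructor
        · intro h
          have := (hI2 x y).mp h
          rw [hgv] at this; cases this
        · intro h
          exact absurd (Option.some.inj h).symm hxu
      · rw [if_neg hxu, if_neg hyv]
        exact hI2 x y
  · -- I3': keys of the new tail are keys of the new succ
    intro x hx
    rw [htail'] at hx
    by_cases hxs : x = s
    · rcases hsc with h | h
      · rw [hcE, hxs, h]; exact Or.inl rfl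
      · rw [hcE, hxs]; exact Or.inr h
    · rw [if_neg hxs] at hx
      by_cases hxv : x = v
      · rw [if_pos hxv] at hx; cases hx
      · rw [if_neg hxv] at hx
        rw [hcE]
        exact Or.inr (hI3 x hx)
  · -- I4': live chain starts still map to their chain ends
    intro x e hcx hpx hre hce
    obtain ⟨heu, hce'⟩ := (hcEf e).mp hce
    obtain ⟨hxv, hpx'⟩ := (hcPf x).mp hpx
    rw [htail']
    by_cases hxs : x = s
    · rw [if_pos hxs]
      rw [hxs] at hre
      rcases greach_drop hre hce with h | ⟨h1, h2⟩
      · exact absurd (greach_end_unique h hce' hsr hu) heu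
      · rw [greach_end_unique h2 hce' her hec]
    · rw [if_neg hxs, if_neg hxv]
      have hxu : x ≠ u := by
        intro hxu
        have hsu : s ≠ u := by rw [hxu] at hxs; exact fun hh => hxs hh.symm
        have := (hheadu hsu).2
        rw [hxu] at hpx'
        rw [hpx'] at this; cases this
      have hcx' : Eo.contains x = true := by
        rcases (hcE x).mp hcx with h | h
        · exact absurd h hxu
        · exact h
      rcases greach_drop hre hce with h | ⟨h1, h2⟩
      · exact hI4 x e hcx' hpx' h hce'
      · exfalso
        have hpu : pred.contains u = true := by
          rcases greach_last_step h1 with h' | ⟨w, hw⟩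
          · exact absurd h' hxu
          · exact contains_of_get?_eq_some ((hI2 w u).mp hw)
        have := hI6 x u hpu hu hpx' h1
        rw [hs, this] at hxs
        exact hxs rfl
  · -- I5': keys of the new head have incoming edges in the new succ
    intro e hx
    rw [hhead'] at hx
    by_cases hee : e = e0
    · rcases hep with h | h
      · rw [hcP, hee, h]; exact Or.inl rfl
      · rw [hcP, hee]; exact Or.inr h
    · rw [if_neg hee] at hx
      by_cases heu : e = u
      · rw [if_pos heu] at hx; cases hx
      · rw [if_neg heu] at hx
        rw [hcP]
        exact Or.inr (hI5 e hx)
  · -- I6': live chain ends still map back to their chain starts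
    intro x e hpe hce hpx hre
    obtain ⟨heu, hce'⟩ := (hcEf e).mp hce
    obtain ⟨hxv, hpx'⟩ := (hcPf x).mp hpx
    rw [hhead']
    by_cases hee : e = e0
    · rw [if_pos hee]
      rw [hee] at hre
      have hxs : x = s := by
        rcases greach_drop hre ((hcEf e0).mpr ⟨by rw [← hee]; exact heu, by rw [← hee]; exact hce'⟩) with h | ⟨h1, h2⟩
        · exfalso
          by_cases hve : e0 = v
          · rw [hve] at h
            rcases greach_last_step h with h' | ⟨w, hw⟩
            · exact hxv h'
            · have := contains_of_get?_eq_some ((hI2 w v).mp hw)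
              rw [hv] at this; cases this
          · have hpe0 : pred.contains e0 = true := by
              rcases hep with h' | h'
              · exact absurd h' hve
              · exact h'
            have hx1 := hI6 x e0 hpe0 hec hpx' h
            have hx2 := hI6 v e0 hpe0 hec hv her
            rw [hx1] at hx2
            exact hxv (Option.some.inj hx2)
        · by_cases hxu : x = u
          · have hpu : pred.contains u = false := by rw [← hxu]; exact hpx'
            cases hh : head.get? u with
            | none => simp [hs, hh, hxu]
            | some w =>
              have := hI5 u (by rw [hh]; rfl)
              rw [hpu] at this; cases this
          · have hpu : pred.contains u = true := by
              rcases greach_last_step h1 with h' | ⟨w, hw⟩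
              · exact absurd h' hxu
              · exact contains_of_get?_eq_some ((hI2 w u).mp hw)
            have hhu := hI6 x u hpu hu hpx' h1
            simp [hs, hhu]
      rw [hxs]
    · rw [if_neg hee, if_neg heu]
      have hev : e ≠ v := by
        intro hev
        have hcv : Eo.contains v = false := by rw [← hev]; exact hce'
        have : tail.get? v = none := by
          cases h : tail.get? v with
          | none => rfl
          | some w => have := hI3 v (by rw [h]; rfl); rw [hcv] at this; cases this
        rw [he0def, this] at hee
        exact hee (by simp [hev])
      have hpe' : pred.contains e = true := by
        rcases (hcP e).mp hpe with h | h
        · exact absurd h hev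
        · exact h
      rcases greach_drop hre hce with h | ⟨h1, h2⟩
      · exact hI6 x e hpe' hce' hpx' h
      · exact absurd (greach_end_unique h2 hce' her hec) hee
  

-- B's endpoint-map test computes exactly A's chain walk
theorem cycle_eq {Eo pred tail head : PySem.Dict Int Int} (hInv : GInv Eo pred tail head)
    {u v : Int} (hu : Eo.contains u = false) (hv : pred.contains v = false) :
    gtspIsCycle Eo u v = (tail.get? v == some u) := by
  obtain ⟨hnd, hndp, hI2, hI3, hI4, hI5, hI6⟩ := hInv
  cases hcv : Eo.contains v with
  | false =>
    have ht : tail.get? v = none := by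
      cases h : tail.get? v with
      | none => rfl
      | some w => have := hI3 v (by rw [h]; rfl); rw [hcv] at this; cases this
    have hgv : Eo.get? v = none := get?_eq_none_of_contains_false hcv
    simp [gtspIsCycle, gtspWalkA, hgv, ht]
  | true =>
    obtain ⟨e, hr, he⟩ := greach_total hI2 Eo.keys.length [] v (by simp) hv (by simp)
    have hw := walkA_eval hI2 hu (Eo.size + 1) [] v e
      (by rw [size_eq_keys_length]; simp) hv (by simp) hr he
    have ht := hI4 v e hcv hv hr he
    rw [gtspIsCycle, hw, hcv, ht]
    by_cases heu : e = u <;> simp [heu]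

theorem step_equiv (n : Nat) (st : GTSPState)
    (hInv : GInv st.succ st.pred st.tail st.head) (it : (Int × Int) × Int) :
    (gtspStepA n (st.succ, st.cost) it).1 = (gtspStepB n st it).succ ∧
    (gtspStepA n (st.succ, st.cost) it).2 = (gtspStepB n st it).cost ∧
    GInv (gtspStepB n st it).succ (gtspStepB n st it).pred
         (gtspStepB n st it).tail (gtspStepB n st it).head := by
  obtain ⟨Eo, pred, tail, head, c⟩ := st
  have hvals : Eo.values.contains it.1.2 = pred.contains it.1.2 :=
    values_contains_eq hInv.2.2.1 hInv.1 it.1.2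
  by_cases h1 : (Eo.contains it.1.1 || pred.contains it.1.2) = true
  · have ha : gtspStepA n (Eo, c) it = (Eo, c) := by
      simp only [gtspStepA, hvals]
      rw [if_pos h1]
    have hb : gtspStepB n ⟨Eo, pred, tail, head, c⟩ it = ⟨Eo, pred, tail, head, c⟩ := by
      simp only [gtspStepB]
      rw [if_pos h1]
    rw [ha, hb]
    exact ⟨rfl, rfl, hInv⟩
  · have hu : Eo.contains it.1.1 = false := by
      cases h : Eo.contains it.1.1
      · rfl
      · rw [h] at h1; simp at h1
    have hv : pred.contains it.1.2 = false := by
      cases h : pred.contains it.1.2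
      · rfl
      · rw [h] at h1; simp at h1
    have h1' : (Eo.contains it.1.1 || pred.contains it.1.2) = false := by rw [hu, hv]; rfl
    have hcyc := cycle_eq hInv hu hv
    by_cases h2 : (decide ((Eo.size : Int) < (n : Int) - 1) && (tail.get? it.1.2 == some it.1.1)) = true
    · have ha : gtspStepA n (Eo, c) it = (Eo, c) := by
        simp only [gtspStepA, hvals, h1', Bool.false_eq_true, if_false, hcyc]
        rw [if_pos h2]
      have hb : gtspStepB n ⟨Eo, pred, tail, head, c⟩ it = ⟨Eo, pred, tail, head, c⟩ := by
        simp only [gtspStepB, h1', Bool.false_eq_true, if_false]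
        rw [if_pos h2]
      rw [ha, hb]
      exact ⟨rfl, rfl, hInv⟩
    · have h2' : (decide ((Eo.size : Int) < (n : Int) - 1) && (tail.get? it.1.2 == some it.1.1)) = false := by
        cases h : (decide ((Eo.size : Int) < (n : Int) - 1) && (tail.get? it.1.2 == some it.1.1))
        · rfl
        · exact absurd h h2
      have ha : gtspStepA n (Eo, c) it = (Eo.insert it.1.1 it.1.2, c + it.2) := by
        simp only [gtspStepA, hvals, h1', Bool.false_eq_true, if_false, hcyc, h2']
      have hb : gtspStepB n ⟨Eo, pred, tail, head, c⟩ it =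
          ⟨Eo.insert it.1.1 it.1.2, pred.insert it.1.2 it.1.1,
           (tail.erase it.1.2).insert ((head.get? it.1.1).getD it.1.1) ((tail.get? it.1.2).getD it.1.2),
           (head.erase it.1.1).insert ((tail.get? it.1.2).getD it.1.2) ((head.get? it.1.1).getD it.1.1),
           c + it.2⟩ := by
        simp only [gtspStepB, h1', Bool.false_eq_true, if_false, h2']
      rw [ha, hb]
      exact ⟨rfl, rfl, ginv_insert hInv hu hv⟩

theorem fold_equiv (n : Nat) : ∀ (edges : List ((Int × Int) × Int)) (st : GTSPState),
    GInv st.succ st.pred st.tail st.head →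
    (edges.foldl (gtspStepA n) (st.succ, st.cost)).1 = (edges.foldl (gtspStepB n) st).succ ∧
    (edges.foldl (gtspStepA n) (st.succ, st.cost)).2 = (edges.foldl (gtspStepB n) st).cost ∧
    GInv (edges.foldl (gtspStepB n) st).succ (edges.foldl (gtspStepB n) st).pred
         (edges.foldl (gtspStepB n) st).tail (edges.foldl (gtspStepB n) st).head := by
  intro edges
  induction edges with
  | nil => intro st h; exact ⟨rfl, rfl, h⟩
  | cons it rest ih =>
    intro st h
    obtain ⟨h1, h2, h3⟩ := step_equiv n st h it
    have := ih (gtspStepB n st it) h3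
    simp only [List.foldl_cons]
    have hpair : gtspStepA n (st.succ, st.cost) it =
        ((gtspStepB n st it).succ, (gtspStepB n st it).cost) := by
      exact Prod.ext h1 h2
    rw [hpair]
    exact this

theorem ginv_empty : GInv PySem.Dict.empty PySem.Dict.empty PySem.Dict.empty PySem.Dict.empty := by
  refine ⟨?_, ?_, ?_, ?_, ?_, ?_, ?_⟩ <;>
    simp [PySem.Dict.get?_empty, PySem.Dict.contains_empty, PySem.Dict.keys_empty]

theorem path_eq (Eo : PySem.Dict Int Int) :
    ∀ (k : Nat) (node : Int) (acc : List Int),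
      gtspPathA Eo k node acc = gtspPathB Eo k node acc := by
  intro k
  induction k with
  | zero => intro node acc; rfl
  | succ k ih =>
    intro node acc
    simp only [gtspPathA, gtspPathB]
    cases Eo.get? node with
    | none => rfl
    | some nxt => exact ih nxt (acc ++ [nxt])

-- ===== VERDICT (by name: the statement is the Claim_ definition above) =====
theorem G_TSP_spec : Claim_equal_G_TSP := by
  intro graph weights _ _
  simp only [Spec_G_TSP, G_TSP, G_TSP_alt]
  obtain ⟨h1, h2, _⟩ := fold_equiv (PySem.Dict.ofList graph : PySem.Dict Int (List Int)).size
    (PySem.List.sorted (PySem.Dict.ofList (weights.map (fun t => ((t.1, t.2.1), t.2.2))) :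
        PySem.Dict (Int × Int) Int).items (fun it => it.2) false)
    ⟨PySem.Dict.empty, PySem.Dict.empty, PySem.Dict.empty, PySem.Dict.empty, 0⟩ ginv_empty
  simp only at h1 h2
  rw [h1, h2, ]
  cases PySem.List.sorted (PySem.Dict.ofList (weights.map (fun t => ((t.1, t.2.1), t.2.2))) :
      PySem.Dict (Int × Int) Int).items (fun it => it.2) false with
  | nil => rfl
  | cons e rest =>
    dsimp only
    rw [path_eq]
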